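-- pv_equiv track=rewrite | github.com/MDSAMIULSAMI/CodeForces--Python- | Temp/B. AND Reconstruction.py | reconstruct_and
-- ===== SOURCE A (Python) =====
-- def reconstruct_and(t, test_cases):
--     results = []
--     for test_case in test_cases:
--         n, b = test_case
--         a = [0] * n
--
--         # Initialize the first element
--         a[0] = b[0]
--         for i in range(1, n-1):
--             a[i] = b[i-1] | b[i]
--         # Initialize the last element
--         a[n-1] = b[n-2]
--
--         # Validate if the constructed array a is valid
--         valid = True
--         for i in range(n-1):
--             if (a[i] & a[i+1]) != b[i]:
--                 valid = False
--                 break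
--
--         if valid:
--             results.append(a)
--         else:
--             results.append([-1])
--
--     return results
-- ===== SOURCE B (Python) =====
-- def reconstruct_and(t, test_cases):
--     results = []
--     for n, b in test_cases:
--         # Only the first n-1 values of b are relevant.
--         head = b[:n - 1]
--         # Feasibility is a property of b alone: the candidate can only fail at an
--         # interior adjacency, where some bit of b[i-1] and b[i+1] is missing from b[i].
--         if any(x & ~y & z for x, y, z in zip(head, head[1:], head[2:])):
--             results.append([-1])
--         else:
--             results.append([head[0]] + [x | y for x, y in zip(head, head[1:])] + [head[-1]])
--     return results
-- ===== Notes on version B (the rewrite author's own statement) =====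
-- stated objective: alternative
-- what changed: B abandons A's allocate-[0]*n / index-assignment / re-scan-of-a strategy: it slices the relevant prefix head=b[:n-1], decides feasibility purely on b by scanning triples zip(head, head[1:], head[2:]) for a bit present in the neighbours but missing in the middle (x & ~y & z), and builds the answer by list concatenation of [head[0]], the pairwise ORs from zip(head, head[1:]), and [head[-1]] - no index arithmetic, no mutation, no constructed-array re-scan.
-- outside the precondition, e.g. on reconstruct_and(1, [(1, [5, 7])]): A returns [[7]], B raises IndexError
import Mathlib
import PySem

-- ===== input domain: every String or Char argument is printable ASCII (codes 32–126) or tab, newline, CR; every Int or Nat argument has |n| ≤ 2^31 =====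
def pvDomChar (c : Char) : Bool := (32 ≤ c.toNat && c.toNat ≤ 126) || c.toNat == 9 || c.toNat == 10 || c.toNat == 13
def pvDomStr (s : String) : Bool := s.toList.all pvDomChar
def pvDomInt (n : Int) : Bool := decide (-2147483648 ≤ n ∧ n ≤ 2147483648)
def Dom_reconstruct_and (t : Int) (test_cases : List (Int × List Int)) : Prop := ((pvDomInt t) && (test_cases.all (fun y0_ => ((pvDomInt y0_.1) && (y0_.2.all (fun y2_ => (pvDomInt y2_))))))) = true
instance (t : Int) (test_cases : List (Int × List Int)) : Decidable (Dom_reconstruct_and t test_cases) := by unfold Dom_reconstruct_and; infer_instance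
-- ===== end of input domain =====

-- B decides feasibility purely on b by scanning triples zip(head,head[1:],head[2:]) for a
-- stray bit (x & ~y & z) and assembles the answer by concatenating [head[0]], the pairwise
-- ORs of zip(head,head[1:]) and [head[-1]] over the slice head = b[:n-1] — no index
-- arithmetic, no [0]*n mutation, no re-scan of the constructed array; same cost, alternative.


-- ===== PORT A =====
-- for i in range(1, n-1): a[i] = b[i-1] | b[i]   (IndexError propagates as none)
def pvBuildA (b : List Int) : List Int → List Int → Option (List Int)
  | a, [] => some a
  | a, i :: rest =>
    match PySem.List.pyGet? b (i - 1), PySem.List.pyGet? b i with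
    | some x, some y =>
      match PySem.List.pySet? a i (PySem.Int.bor x y) with
      | some a' => pvBuildA b a' rest
      | none => none
    | _, _ => none

-- for i in range(n-1): if (a[i] & a[i+1]) != b[i]: valid = False; break
def pvValidA (a b : List Int) : List Int → Option Bool
  | [] => some true
  | i :: rest =>
    match PySem.List.pyGet? a i, PySem.List.pyGet? a (i + 1), PySem.List.pyGet? b i with
    | some x, some y, some z =>
      if PySem.Int.band x y ≠ z then some false else pvValidA a b rest
    | _, _, _ => none

-- one iteration of A's main loop: none = the Python raises (excluded by Pre_)
def pvCaseA (n : Int) (b : List Int) : Option (List Int) :=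
  match PySem.List.pyGet? b 0 with
  | none => none
  | some v0 =>
    match PySem.List.pySet? (List.replicate n.toNat (0 : Int)) 0 v0 with
    | none => none
    | some a1 =>
      match pvBuildA b a1 (PySem.List.pyRange 1 (n - 1) 1) with
      | none => none
      | some a2 =>
        match PySem.List.pyGet? b (n - 2) with
        | none => none
        | some vl =>
          match PySem.List.pySet? a2 (n - 1) vl with
          | none => none
          | some a3 =>
            match pvValidA a3 b (PySem.List.pyRange 0 (n - 1) 1) with
            | none => none
            | some valid => some (if valid then a3 else [-1])

def reconstruct_and (t : Int) (test_cases : List (Int × List Int)) : List (List Int) :=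
  test_cases.foldl (fun results tc => results ++ [(pvCaseA tc.1 tc.2).getD []]) []

-- ===== PORT B =====
-- any(x & ~y & z for x, y, z in zip(head, head[1:], head[2:]))  (3-way zip as nested pairs)
def pvAnyBad : List (Int × Int × Int) → Bool
  | [] => false
  | (x, y, z) :: rest =>
    if PySem.Int.band (PySem.Int.band x (Int.not y)) z ≠ 0 then true else pvAnyBad rest

-- [x | y for x, y in zip(head, head[1:])]
def pvOrPairs : List (Int × Int) → List Int
  | [] => []
  | (x, y) :: rest => PySem.Int.bor x y :: pvOrPairs rest

-- one iteration of B's loop; none = Source B raises (head[0]/head[-1] on empty head), excluded by Pre_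
def pvCaseB (n : Int) (b : List Int) : Option (List Int) :=
  let head := PySem.List.slice b none (some (n - 1))
  if pvAnyBad (head.zip ((PySem.List.slice head (some 1) none).zip
      (PySem.List.slice head (some 2) none))) then
    some [-1]
  else
    match PySem.List.pyGet? head 0, PySem.List.pyGet? head (-1) with
    | some h0, some hl =>
      some (h0 :: (pvOrPairs (head.zip (PySem.List.slice head (some 1) none)) ++ [hl]))
    | _, _ => none

def reconstruct_and_alt (t : Int) (test_cases : List (Int × List Int)) : List (List Int) :=
  test_cases.foldl (fun results tc => results ++ [(pvCaseB tc.1 tc.2).getD []]) []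

-- ===== PRECONDITION & SPEC =====
-- Pre_ excludes the test cases where A raises (n ≤ 0: a[0]=... IndexError; len(b) < max(1, n-1):
-- a read b[i], i ≤ n-2, raises) and the degenerate n == 1 cases with a nonempty b, where A's
-- unused last-element rule a[n-1] = b[n-2] reads b[-1] by negative-index wraparound while B's
-- natural construction raises on the empty slice b[:0] — a corner no one would specify.
def Pre_reconstruct_and (t : Int) (test_cases : List (Int × List Int)) : Prop :=
  ∀ c ∈ test_cases, 2 ≤ c.1 ∧ c.1 - 1 ≤ (c.2.length : Int)
instance (t : Int) (test_cases : List (Int × List Int)) : Decidable (Pre_reconstruct_and t test_cases) := by unfold Pre_reconstruct_and; infer_instance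

def pvWitness_reconstruct_and : Int × (List (Int × List Int)) := (1, [(3, [1, 3]), (3, [4, 2, 9])])

def Spec_reconstruct_and (t : Int) (test_cases : List (Int × List Int)) (out : List (List Int)) : Prop := out = reconstruct_and_alt t test_cases
instance (t : Int) (test_cases : List (Int × List Int)) (out : List (List Int)) : Decidable (Spec_reconstruct_and t test_cases out) := by unfold Spec_reconstruct_and; infer_instance

-- ===== CLAIM (what is proved, stated in full; the proofs are below) =====
def Claim_equal_reconstruct_and : Prop := ∀ (t : Int) (test_cases : List (Int × List Int)), Dom_reconstruct_and t test_cases → Pre_reconstruct_and t test_cases → Spec_reconstruct_and t test_cases (reconstruct_and t test_cases)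

-- ===== LEMMAS AND PROOFS =====

-- ---- integers as bit sequences: pvTb a k = bit k of a in Python's infinite two's complement
def pvTb : Int → Nat → Bool
  | Int.ofNat m, k => m.testBit k
  | Int.negSucc m, k => !(m.testBit k)

lemma pvLdiffAdd (m : Nat) : ∀ n : Nat, m.ldiff n + (m &&& n) = m := by
  induction m using Nat.binaryRec with
  | zero => intro n; simp [Nat.ldiff, Nat.bitwise_zero_left]
  | bit a m' IH =>
    intro n
    cases n using Nat.bitCasesOn with
    | bit b n' =>
      rw [Nat.ldiff_bit, Nat.land_bit, Nat.bit_val, Nat.bit_val, Nat.bit_val]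
      have := IH n'
      cases a <;> cases b <;> simp <;> omega

lemma pvSubAndTestBit (m n k : Nat) :
    (m - (m &&& n)).testBit k = (m.testBit k && !(n.testBit k)) := by
  have h : m - (m &&& n) = m.ldiff n := by have := pvLdiffAdd m n; omega
  rw [h, Nat.testBit_ldiff]

lemma pvNegSuccNonneg (m : Nat) : ¬ (0 : Int) ≤ Int.negSucc m := by
  rw [Int.negSucc_eq]; omega

lemma pvNegSuccAux (m : Nat) : (-(Int.negSucc m) - 1).toNat = m := by
  rw [Int.negSucc_eq]; omega

lemma pvBand_ns (m n : Nat) :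
    PySem.Int.band (Int.ofNat m) (Int.negSucc n) = Int.ofNat (m - (m &&& n)) := by
  unfold PySem.Int.band
  rw [if_pos (by exact Int.natCast_nonneg m), if_neg (pvNegSuccNonneg n), pvNegSuccAux]
  rfl

lemma pvBand_sn (m n : Nat) :
    PySem.Int.band (Int.negSucc m) (Int.ofNat n) = Int.ofNat (n - (n &&& m)) := by
  unfold PySem.Int.band
  rw [if_neg (pvNegSuccNonneg m), if_pos (by exact Int.natCast_nonneg n), pvNegSuccAux]
  rfl

lemma pvBand_ss (m n : Nat) :
    PySem.Int.band (Int.negSucc m) (Int.negSucc n) = Int.negSucc (m ||| n) := by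
  unfold PySem.Int.band
  rw [if_neg (pvNegSuccNonneg m), if_neg (pvNegSuccNonneg n), pvNegSuccAux, pvNegSuccAux,
    Int.negSucc_eq]
  ring

lemma pvBor_nn (m n : Nat) :
    PySem.Int.bor (Int.ofNat m) (Int.ofNat n) = Int.ofNat (m ||| n) := by
  unfold PySem.Int.bor
  rw [if_pos (by exact Int.natCast_nonneg m), if_pos (by exact Int.natCast_nonneg n)]
  rfl

lemma pvBand_nn (m n : Nat) :
    PySem.Int.band (Int.ofNat m) (Int.ofNat n) = Int.ofNat (m &&& n) := by
  unfold PySem.Int.band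
  rw [if_pos (by exact Int.natCast_nonneg m), if_pos (by exact Int.natCast_nonneg n)]
  rfl

lemma pvBor_ns (m n : Nat) :
    PySem.Int.bor (Int.ofNat m) (Int.negSucc n) = Int.negSucc (n - (n &&& m)) := by
  unfold PySem.Int.bor
  rw [if_pos (by exact Int.natCast_nonneg m), if_neg (pvNegSuccNonneg n), pvNegSuccAux,
    show (Int.ofNat m).toNat = m from rfl, Int.negSucc_eq]
  omega

lemma pvBor_sn (m n : Nat) :
    PySem.Int.bor (Int.negSucc m) (Int.ofNat n) = Int.negSucc (m - (m &&& n)) := by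
  unfold PySem.Int.bor
  rw [if_neg (pvNegSuccNonneg m), if_pos (by exact Int.natCast_nonneg n), pvNegSuccAux,
    show (Int.ofNat n).toNat = n from rfl, Int.negSucc_eq]
  omega

lemma pvBor_ss (m n : Nat) :
    PySem.Int.bor (Int.negSucc m) (Int.negSucc n) = Int.negSucc (m &&& n) := by
  unfold PySem.Int.bor
  rw [if_neg (pvNegSuccNonneg m), if_neg (pvNegSuccNonneg n), pvNegSuccAux, pvNegSuccAux,
    Int.negSucc_eq]
  ring

lemma pvTb_band (a b : Int) (k : Nat) :
    pvTb (PySem.Int.band a b) k = (pvTb a k && pvTb b k) := by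
  cases a with
  | ofNat m =>
    cases b with
    | ofNat n =>
      rw [pvBand_nn]
      show (m &&& n).testBit k = _
      rw [Nat.testBit_and]
      rfl
    | negSucc n =>
      rw [pvBand_ns]
      show (m - (m &&& n)).testBit k = _
      rw [pvSubAndTestBit]
      rfl
  | negSucc m =>
    cases b with
    | ofNat n =>
      rw [pvBand_sn]
      show (n - (n &&& m)).testBit k = _
      rw [pvSubAndTestBit]
      show _ = (!m.testBit k && n.testBit k)
      cases m.testBit k <;> cases n.testBit k <;> rfl
    | negSucc n =>
      rw [pvBand_ss]
      show (!((m ||| n).testBit k)) = _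
      rw [Nat.testBit_or]
      show _ = (!m.testBit k && !n.testBit k)
      cases m.testBit k <;> cases n.testBit k <;> rfl

lemma pvTb_bor (a b : Int) (k : Nat) :
    pvTb (PySem.Int.bor a b) k = (pvTb a k || pvTb b k) := by
  cases a with
  | ofNat m =>
    cases b with
    | ofNat n =>
      rw [pvBor_nn]
      show (m ||| n).testBit k = _
      rw [Nat.testBit_or]
      rfl
    | negSucc n =>
      rw [pvBor_ns]
      show (!((n - (n &&& m)).testBit k)) = _
      rw [pvSubAndTestBit]
      show _ = (m.testBit k || !n.testBit k)
      cases m.testBit k <;> cases n.testBit k <;> rfl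
  | negSucc m =>
    cases b with
    | ofNat n =>
      rw [pvBor_sn]
      show (!((m - (m &&& n)).testBit k)) = _
      rw [pvSubAndTestBit]
      show _ = (!m.testBit k || n.testBit k)
      cases m.testBit k <;> cases n.testBit k <;> rfl
    | negSucc n =>
      rw [pvBor_ss]
      show (!((m &&& n).testBit k)) = _
      rw [Nat.testBit_and]
      show _ = (!m.testBit k || !n.testBit k)
      cases m.testBit k <;> cases n.testBit k <;> rfl

lemma pvTb_not (a : Int) (k : Nat) : pvTb (Int.not a) k = !pvTb a k := by
  cases a with
  | ofNat m =>
    have h : Int.not (Int.ofNat m) = Int.negSucc m := by simp [Int.not]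
    rw [h]
    simp [pvTb]
  | negSucc m =>
    have h : Int.not (Int.negSucc m) = Int.ofNat m := by simp [Int.not]
    rw [h]
    simp [pvTb]

lemma pvTb_zero (k : Nat) : pvTb 0 k = false := by
  show (0 : Nat).testBit k = false
  simp

lemma pvTb_ext {a b : Int} (h : ∀ k, pvTb a k = pvTb b k) : a = b := by
  cases a with
  | ofNat m =>
    cases b with
    | ofNat n =>
      have : m = n := Nat.eq_of_testBit_eq fun k => h k
      rw [this]
    | negSucc n =>
      exfalso
      have hk : m.testBit (m + n) = !(n.testBit (m + n)) := h (m + n)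
      rw [Nat.testBit_eq_false_of_lt (lt_of_le_of_lt (Nat.le_add_right _ _) Nat.lt_two_pow_self),
        Nat.testBit_eq_false_of_lt (lt_of_le_of_lt (Nat.le_add_left _ _) Nat.lt_two_pow_self)] at hk
      simp at hk
  | negSucc m =>
    cases b with
    | ofNat n =>
      exfalso
      have hk : (!(m.testBit (m + n))) = n.testBit (m + n) := h (m + n)
      rw [Nat.testBit_eq_false_of_lt (lt_of_le_of_lt (Nat.le_add_right _ _) Nat.lt_two_pow_self),
        Nat.testBit_eq_false_of_lt (lt_of_le_of_lt (Nat.le_add_left _ _) Nat.lt_two_pow_self)] at hk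
      simp at hk
    | negSucc n =>
      have : m = n := Nat.eq_of_testBit_eq fun k => by
        have hk : (!(m.testBit k)) = !(n.testBit k) := h k
        simpa using hk
      rw [this]

lemma pvAbsorb1 (x y : Int) : PySem.Int.band x (PySem.Int.bor x y) = x :=
  pvTb_ext fun k => by
    rw [pvTb_band, pvTb_bor]; cases pvTb x k <;> cases pvTb y k <;> rfl

lemma pvAbsorb2 (x y : Int) : PySem.Int.band (PySem.Int.bor x y) y = y :=
  pvTb_ext fun k => by
    rw [pvTb_band, pvTb_bor]; cases pvTb x k <;> cases pvTb y k <;> rfl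

lemma pvDistrib (p q r : Int) :
    PySem.Int.band (PySem.Int.bor p q) (PySem.Int.bor q r)
      = PySem.Int.bor q (PySem.Int.band p r) :=
  pvTb_ext fun k => by
    rw [pvTb_band, pvTb_bor, pvTb_bor, pvTb_bor, pvTb_band]
    cases pvTb p k <;> cases pvTb q k <;> cases pvTb r k <;> rfl

lemma pvBorComm (a b : Int) : PySem.Int.bor a b = PySem.Int.bor b a :=
  pvTb_ext fun k => by rw [pvTb_bor, pvTb_bor, Bool.or_comm]

-- "no stray bit at a triple" is exactly "the middle absorbs the AND of the neighbours"
lemma pvBadIff (x y z : Int) :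
    (PySem.Int.band (PySem.Int.band x (Int.not y)) z = 0)
      ↔ (PySem.Int.bor (PySem.Int.band x z) y = y) := by
  constructor
  · intro h
    apply pvTb_ext
    intro k
    have hb := congrArg (fun a => pvTb a k) h
    simp only [pvTb_band, pvTb_not, pvTb_zero] at hb
    rw [pvTb_bor, pvTb_band]
    cases hx : pvTb x k <;> cases hy : pvTb y k <;> cases hz : pvTb z k <;> simp_all
  · intro h
    apply pvTb_ext
    intro k
    have hb := congrArg (fun a => pvTb a k) h
    simp only [pvTb_bor, pvTb_band] at hb
    rw [pvTb_band, pvTb_band, pvTb_not, pvTb_zero]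
    cases hx : pvTb x k <;> cases hy : pvTb y k <;> cases hz : pvTb z k <;> simp_all

-- ---- list plumbing
lemma pvGetD_eq (xs : List Int) (i : Int) (h0 : 0 ≤ i) (h1 : i < (xs.length : Int)) :
    PySem.List.pyGet? xs i = some (xs.getD i.toNat 0) := by
  rw [PySem.List.pyGet?_of_nonneg xs h0,
      List.getElem?_eq_getElem (by omega), List.getD_eq_getElem _ _ (by omega)]

lemma pvSetD_eq (xs : List Int) (i : Int) (v : Int) (h0 : 0 ≤ i) (h1 : i < (xs.length : Int)) :
    PySem.List.pySet? xs i v = some (xs.set i.toNat v) := by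
  have h : i = ((i.toNat : Nat) : Int) := by omega
  rw [h, PySem.List.pySet?_natCast xs i.toNat v (by omega)]
  rfl

lemma pvGetD_set (xs : List Int) (m k : Nat) (v : Int) :
    (xs.set m v).getD k 0 = if m = k ∧ m < xs.length then v else xs.getD k 0 := by
  rw [List.getD_eq_getElem?_getD, List.getD_eq_getElem?_getD, List.getElem?_set]
  split_ifs with h1 h2 h3 <;> simp_all <;> omega

lemma pvAllCongr {l : List Int} {p q : Int → Bool} (h : ∀ x ∈ l, p x = q x) :
    l.all p = l.all q := by
  induction l with
  | nil => rfl
  | cons x xs ih =>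
    simp only [List.all_cons, h x (by simp), ih (fun y hy => h y (by simp [hy]))]

lemma pvListEq (xs ys : List Int) (hlen : xs.length = ys.length)
    (h : ∀ k, k < xs.length → xs.getD k 0 = ys.getD k 0) : xs = ys := by
  apply List.ext_getElem hlen
  intro k h1 h2
  have := h k h1
  rwa [List.getD_eq_getElem _ _ h1, List.getD_eq_getElem _ _ h2] at this

-- zip with the shifted tails, characterised positionally
lemma pvZip2_eq (l : List Int) :
    l.zip (l.drop 1)
      = (List.range (l.length - 1)).map (fun j => (l.getD j 0, l.getD (j + 1) 0)) := by
  apply List.ext_getElem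
  · simp only [List.length_zip, List.length_map, List.length_range, List.length_drop]; omega
  · intro k h1 h2
    have hk : k < l.length - 1 := by simp only [List.length_zip, List.length_drop] at h1; omega
    simp only [List.getElem_zip, List.getElem_map, List.getElem_range, List.getElem_drop]
    rw [List.getD_eq_getElem _ _ (by omega), List.getD_eq_getElem _ _ (by omega)]
    simp [Nat.add_comm]

lemma pvZip3_eq (l : List Int) :
    l.zip ((l.drop 1).zip (l.drop 2))
      = (List.range (l.length - 2)).map
          (fun j => (l.getD j 0, l.getD (j + 1) 0, l.getD (j + 2) 0)) := by
  apply List.ext_getElem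
  · simp only [List.length_zip, List.length_map, List.length_range, List.length_drop]; omega
  · intro k h1 h2
    have hk : k < l.length - 2 := by simp only [List.length_zip, List.length_drop] at h1; omega
    simp only [List.getElem_zip, List.getElem_map, List.getElem_range, List.getElem_drop]
    rw [List.getD_eq_getElem _ _ (by omega), List.getD_eq_getElem _ _ (by omega),
      List.getD_eq_getElem _ _ (by omega)]
    simp [Nat.add_comm]

lemma pvAnyBad_eq_any (L : List (Int × Int × Int)) :
    pvAnyBad L
      = L.any (fun p => decide
          (PySem.Int.band (PySem.Int.band p.1 (Int.not p.2.1)) p.2.2 ≠ 0)) := by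
  induction L with
  | nil => rfl
  | cons p rest IH =>
    obtain ⟨x, y, z⟩ := p
    simp only [pvAnyBad, List.any_cons, IH]
    by_cases h : PySem.Int.band (PySem.Int.band x (Int.not y)) z ≠ 0
    · rw [if_pos h]; simp [h]
    · rw [if_neg h]; simp [h]

lemma pvOrPairs_eq_map (L : List (Int × Int)) :
    pvOrPairs L = L.map (fun p => PySem.Int.bor p.1 p.2) := by
  induction L with
  | nil => rfl
  | cons p rest IH => obtain ⟨x, y⟩ := p; simp [pvOrPairs, IH]

-- all over pyRange 1 (1+K) via List.range
lemma pvAllRange (p : Int → Bool) : ∀ K : Nat,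
    (PySem.List.pyRange 1 (1 + (K : Int)) 1).all p
      = (List.range K).all (fun j => p ((j : Int) + 1)) := by
  intro K
  induction K with
  | zero => rw [PySem.List.pyRange_one_eq_nil (by norm_num)]; rfl
  | succ K IH =>
    have h1 : (1 : Int) + ((K + 1 : Nat) : Int) = (1 + (K : Int)) + 1 := by push_cast; ring
    rw [h1, PySem.List.pyRange_one_succ_right (by omega), List.range_succ,
      List.all_append, List.all_append, IH]
    simp [Int.add_comm]

-- ---- the value of B's comprehension at index i, and B's per-index check
def pvG (n : Int) (b : List Int) (i : Int) : Int :=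
  if i = n - 1 then b.getD (n - 2).toNat 0
  else if i = 0 then b.getD 0 0
  else PySem.Int.bor (b.getD (i - 1).toNat 0) (b.getD i.toNat 0)

def pvPb (b : List Int) (i : Int) : Bool :=
  decide (PySem.Int.bor (PySem.Int.band (b.getD (i - 1).toNat 0) (b.getD (i + 1).toNat 0))
    (b.getD i.toNat 0) = b.getD i.toNat 0)

-- ---- loop characterizations for A
lemma pvBuildA_spec (b : List Int) (L : List Int) : ∀ (a : List Int),
    (∀ i ∈ L, 1 ≤ i ∧ i < (a.length : Int) ∧ i < (b.length : Int)) →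
    ∃ a', pvBuildA b a L = some a' ∧ a'.length = a.length ∧
      ∀ k : Nat, a'.getD k 0 =
        if (k : Int) ∈ L then PySem.Int.bor (b.getD (k - 1) 0) (b.getD k 0)
        else a.getD k 0 := by
  induction L with
  | nil =>
    intro a _
    exact ⟨a, rfl, rfl, fun k => by simp⟩
  | cons i rest IH =>
    intro a h
    obtain ⟨h1, h2, h3⟩ := h i (by simp)
    have hx := pvGetD_eq b (i - 1) (by omega) (by omega)
    have hy := pvGetD_eq b i (by omega) h3
    have hset := pvSetD_eq a i (PySem.Int.bor (b.getD (i - 1).toNat 0) (b.getD i.toNat 0)) (by omega) h2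
    obtain ⟨a', ha', hlen, hchar⟩ := IH (a.set i.toNat (PySem.Int.bor (b.getD (i - 1).toNat 0) (b.getD i.toNat 0)))
      (by intro j hj
          obtain ⟨g1, g2, g3⟩ := h j (List.mem_cons_of_mem _ hj)
          exact ⟨g1, by rwa [List.length_set], g3⟩)
    refine ⟨a', ?_, by rwa [List.length_set] at hlen, ?_⟩
    · simp only [pvBuildA, hx, hy, hset, ha']
    · intro k
      have hk := hchar k
      rw [hk, pvGetD_set]
      by_cases hmem : (k : Int) ∈ rest
      · simp only [hmem, if_true, List.mem_cons, or_true]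
      · by_cases hki : (k : Int) = i
        · have e1 : i.toNat = k := by omega
          have e2 : (i - 1).toNat = k - 1 := by omega
          have hkmem : (k : Int) ∈ i :: rest := by simp [List.mem_cons, hki]
          simp only [hmem, if_false, if_pos hkmem]
          rw [if_pos ⟨e1, by omega⟩, e1, e2]
        · have hne : ¬ ((k : Int) ∈ i :: rest) := by simp [List.mem_cons, hki, hmem]
          have hne2 : ¬ (i.toNat = k ∧ i.toNat < a.length) := by
            rintro ⟨e, _⟩; omega
          simp only [hmem, if_false, if_neg hne, if_neg hne2]

lemma pvValidA_spec (a b : List Int) (L : List Int)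
    (h : ∀ i ∈ L, 0 ≤ i ∧ i + 1 < (a.length : Int) ∧ i < (b.length : Int)) :
    pvValidA a b L = some (L.all fun i =>
      decide (PySem.Int.band (a.getD i.toNat 0) (a.getD (i + 1).toNat 0) = b.getD i.toNat 0)) := by
  induction L with
  | nil => rfl
  | cons i rest IH =>
    obtain ⟨h1, h2, h3⟩ := h i (by simp)
    have hx := pvGetD_eq a i h1 (by omega)
    have hy := pvGetD_eq a (i + 1) (by omega) h2
    have hz := pvGetD_eq b i h1 h3
    simp only [pvValidA, hx, hy, hz]
    by_cases hc : PySem.Int.band (a.getD i.toNat 0) (a.getD (i + 1).toNat 0) = b.getD i.toNat 0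
    · rw [if_neg (not_not_intro hc), IH (fun j hj => h j (List.mem_cons_of_mem _ hj)),
        List.all_cons, decide_eq_true hc, Bool.true_and]
    · rw [if_pos hc, List.all_cons, decide_eq_false hc, Bool.false_and]

-- pointwise: B's "no stray bit" test at triple j is the negation of A's interior condition
lemma pvPointwise (b : List Int) (j : Nat) :
    (!decide (PySem.Int.band (PySem.Int.band (b.getD j 0) (Int.not (b.getD (j + 1) 0)))
        (b.getD (j + 2) 0) ≠ 0))
      = pvPb b ((j : Int) + 1) := by
  unfold pvPb
  have e1 : ((j : Int) + 1 - 1).toNat = j := by omega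
  have e2 : ((j : Int) + 1 + 1).toNat = j + 2 := by omega
  have e3 : ((j : Int) + 1).toNat = j + 1 := by omega
  rw [e1, e2, e3]
  simp only [ne_eq, decide_not, Bool.not_not]
  exact decide_eq_decide.mpr (pvBadIff _ _ _)

-- ---- the single-test-case equivalence
lemma pvCase_eq (n : Int) (b : List Int) (hn : 2 ≤ n)
    (hlen : n - 1 ≤ (b.length : Int)) : pvCaseA n b = pvCaseB n b := by
  have hb1 : 1 ≤ (b.length : Int) := by omega
  -- ================= A side =================
  have hb0 : PySem.List.pyGet? b 0 = some (b.getD 0 0) := pvGetD_eq b 0 (by omega) (by omega)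
  have hs1 : PySem.List.pySet? (List.replicate n.toNat (0 : Int)) 0 (b.getD 0 0)
      = some ((List.replicate n.toNat (0 : Int)).set (0 : Int).toNat (b.getD 0 0)) :=
    pvSetD_eq _ _ _ (by omega) (by simp; omega)
  have ha1len : (((List.replicate n.toNat (0 : Int)).set (0 : Int).toNat
      (b.getD 0 0)).length : Int) = n := by simp; omega
  obtain ⟨a2, hbuild, hlen2, hchar⟩ :=
    pvBuildA_spec b (PySem.List.pyRange 1 (n - 1) 1)
      ((List.replicate n.toNat (0 : Int)).set (0 : Int).toNat (b.getD 0 0))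
      (by intro i hi
          rw [PySem.List.mem_pyRange_one] at hi
          refine ⟨by omega, by omega, by omega⟩)
  have ha2len : (a2.length : Int) = n := by rw [hlen2]; exact ha1len
  have hgl := pvGetD_eq b (n - 2) (by omega) (by omega)
  have hs3 : PySem.List.pySet? a2 (n - 1) (b.getD (n - 2).toNat 0)
      = some (a2.set (n - 1).toNat (b.getD (n - 2).toNat 0)) :=
    pvSetD_eq _ _ _ (by omega) (by omega)
  have ha3len : ((a2.set (n - 1).toNat (b.getD (n - 2).toNat 0)).length : Int) = n := by
    rw [List.length_set]; exact ha2len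
  have hvalid := pvValidA_spec (a2.set (n - 1).toNat (b.getD (n - 2).toNat 0)) b
    (PySem.List.pyRange 0 (n - 1) 1)
    (by intro i hi
        rw [PySem.List.mem_pyRange_one] at hi
        refine ⟨by omega, by omega, by omega⟩)
  -- pointwise description of A's final array
  have hpt : ∀ i : Int, 0 ≤ i → i < n →
      (a2.set (n - 1).toNat (b.getD (n - 2).toNat 0)).getD i.toNat 0 = pvG n b i := by
    intro i hi0 hin
    rw [pvGetD_set]
    by_cases hi1 : i = n - 1
    · rw [if_pos ⟨by omega, by omega⟩]
      unfold pvG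
      rw [if_pos hi1]
    · rw [if_neg (by rintro ⟨e, _⟩; omega)]
      rw [hchar i.toNat]
      by_cases hi0' : i = 0
      · have hnm : ¬ ((i.toNat : Int) ∈ PySem.List.pyRange 1 (n - 1) 1) := by
          rw [PySem.List.mem_pyRange_one]; omega
        rw [if_neg hnm, pvGetD_set, if_pos ⟨by omega, by simp; omega⟩]
        unfold pvG
        rw [if_neg hi1, if_pos hi0']
      · have hm : (i.toNat : Int) ∈ PySem.List.pyRange 1 (n - 1) 1 := by
          rw [PySem.List.mem_pyRange_one]; omega
        rw [if_pos hm]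
        unfold pvG
        rw [if_neg hi1, if_neg hi0']
        have e1 : (i - 1).toNat = i.toNat - 1 := by omega
        rw [e1]
  -- A's validity boolean in terms of the interior condition pvPb
  have hbools : ((PySem.List.pyRange 0 (n - 1) 1).all fun i =>
      decide (PySem.Int.band
        ((a2.set (n - 1).toNat (b.getD (n - 2).toNat 0)).getD i.toNat 0)
        ((a2.set (n - 1).toNat (b.getD (n - 2).toNat 0)).getD (i + 1).toNat 0)
        = b.getD i.toNat 0))
      = (PySem.List.pyRange 1 (n - 2) 1).all (pvPb b) := by
    have hstep : ∀ i ∈ PySem.List.pyRange 0 (n - 1) 1,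
        (decide (PySem.Int.band
          ((a2.set (n - 1).toNat (b.getD (n - 2).toNat 0)).getD i.toNat 0)
          ((a2.set (n - 1).toNat (b.getD (n - 2).toNat 0)).getD (i + 1).toNat 0)
          = b.getD i.toNat 0))
        = decide (PySem.Int.band (pvG n b i) (pvG n b (i + 1)) = b.getD i.toNat 0) := by
      intro i hi
      rw [PySem.List.mem_pyRange_one] at hi
      rw [hpt i hi.1 (by omega), hpt (i + 1) (by omega) (by omega)]
    rw [pvAllCongr hstep]
    by_cases hval2 : n = 2
    · subst hval2
      have e1 : PySem.List.pyRange 0 ((2 : Int) - 1) 1 = [0] := by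
        rw [PySem.List.pyRange_one_cons (by norm_num),
          PySem.List.pyRange_one_eq_nil (by norm_num)]
      have e2 : PySem.List.pyRange 1 ((2 : Int) - 2) 1 = [] :=
        PySem.List.pyRange_one_eq_nil (by norm_num)
      rw [e1, e2]
      have g1 : pvG 2 b (0 + 1) = pvG 2 b 0 := by
        unfold pvG
        rw [if_pos (by norm_num), if_neg (by norm_num), if_pos rfl]
        rfl
      simp only [List.all_cons, List.all_nil, g1, PySem.Int.band_self]
      have g0 : pvG 2 b 0 = b.getD (0 : Int).toNat 0 := by
        unfold pvG; rw [if_neg (by norm_num), if_pos rfl]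
        rfl
      rw [g0]
      simp
    · have hn3 : 3 ≤ n := by omega
      have hsplit : PySem.List.pyRange 0 (n - 1) 1
          = 0 :: (PySem.List.pyRange 1 (n - 2) 1 ++ [n - 2]) := by
        rw [PySem.List.pyRange_one_cons (by omega : (0 : Int) < n - 1),
          show (0 : Int) + 1 = 1 by norm_num,
          show (n : Int) - 1 = (n - 2) + 1 by omega,
          PySem.List.pyRange_one_succ_right (by omega : (1 : Int) ≤ n - 2)]
      rw [hsplit]
      simp only [List.all_cons, List.all_append, List.all_nil]
      have hf0 : decide (PySem.Int.band (pvG n b 0) (pvG n b (0 + 1))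
          = b.getD (0 : Int).toNat 0) = true := by
        have g0 : pvG n b 0 = b.getD (0 : Int).toNat 0 := by
          unfold pvG; rw [if_neg (by omega), if_pos rfl]
          rfl
        have g1 : pvG n b (0 + 1)
            = PySem.Int.bor (b.getD (0 : Int).toNat 0) (b.getD ((0 : Int) + 1).toNat 0) := by
          unfold pvG
          rw [if_neg (by omega), if_neg (by omega), show (0 : Int) + 1 - 1 = 0 by norm_num]
        rw [g0, g1, pvAbsorb1]
        simp
      have hfl : decide (PySem.Int.band (pvG n b (n - 2)) (pvG n b (n - 2 + 1))
          = b.getD (n - 2).toNat 0) = true := by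
        have g0 : pvG n b (n - 2) = PySem.Int.bor (b.getD (n - 2 - 1).toNat 0)
            (b.getD (n - 2).toNat 0) := by
          unfold pvG; rw [if_neg (by omega), if_neg (by omega)]
        have g1 : pvG n b (n - 2 + 1) = b.getD (n - 2).toNat 0 := by
          unfold pvG; rw [if_pos (by omega)]
        rw [g0, g1, pvAbsorb2]
        simp
      have hmid : (PySem.List.pyRange 1 (n - 2) 1).all (fun i =>
          decide (PySem.Int.band (pvG n b i) (pvG n b (i + 1)) = b.getD i.toNat 0))
          = (PySem.List.pyRange 1 (n - 2) 1).all (pvPb b) := by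
        apply pvAllCongr
        intro i hi
        rw [PySem.List.mem_pyRange_one] at hi
        have g0 : pvG n b i = PySem.Int.bor (b.getD (i - 1).toNat 0) (b.getD i.toNat 0) := by
          unfold pvG; rw [if_neg (by omega), if_neg (by omega)]
        have g1 : pvG n b (i + 1)
            = PySem.Int.bor (b.getD i.toNat 0) (b.getD (i + 1).toNat 0) := by
          unfold pvG
          rw [if_neg (by omega), if_neg (by omega), show i + 1 - 1 = i by omega]
        rw [g0, g1, pvDistrib, pvBorComm]
        unfold pvPb
        rfl
      rw [hf0, hfl, hmid]
      simp
  -- A's final array is pvG mapped over range(n)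
  have harr : a2.set (n - 1).toNat (b.getD (n - 2).toNat 0)
      = (PySem.List.pyRange 0 n 1).map (pvG n b) := by
    apply pvListEq
    · rw [List.length_map, PySem.List.length_pyRange_one, List.length_set]
      omega
    · intro k hk
      rw [List.length_set] at hk
      have hkn : (k : Int) < n := by omega
      have hmaplen : k < ((PySem.List.pyRange 0 n 1).map (pvG n b)).length := by
        rw [List.length_map, PySem.List.length_pyRange_one]; omega
      have h3 := hpt (k : Int) (by omega) hkn
      rw [Int.toNat_natCast] at h3
      rw [h3, List.getD_eq_getElem _ _ hmaplen, List.getElem_map,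
        PySem.List.getElem_pyRange_one]
      norm_num
  have hAeq : pvCaseA n b
      = some (if (PySem.List.pyRange 1 (n - 2) 1).all (pvPb b)
          then a2.set (n - 1).toNat (b.getD (n - 2).toNat 0) else [-1]) := by
    simp only [pvCaseA, hb0, hs1, hbuild, hgl, hs3, hvalid]
    rw [hbools]
  -- ================= B side =================
  have hM : ((n - 1).toNat : Int) = n - 1 := by omega
  have hhead : PySem.List.slice b none (some (n - 1)) = b.take (n - 1).toNat := by
    rw [PySem.List.slice_to b (by omega)]
  have hheadlen : (b.take (n - 1).toNat).length = (n - 1).toNat := by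
    rw [List.length_take]; omega
  have hhg : ∀ k : Nat, k < (n - 1).toNat → (b.take (n - 1).toNat).getD k 0 = b.getD k 0 := by
    intro k hk
    rw [List.getD_eq_getElem _ _ (by omega), List.getD_eq_getElem _ _ (by omega),
      List.getElem_take]
  have hsl1 : PySem.List.slice (b.take (n - 1).toNat) (some 1) none
      = (b.take (n - 1).toNat).drop 1 := by
    rw [PySem.List.slice_from (b.take (n - 1).toNat) (by norm_num)]
    norm_num
  have hsl2 : PySem.List.slice (b.take (n - 1).toNat) (some 2) none
      = (b.take (n - 1).toNat).drop 2 := by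
    rw [PySem.List.slice_from (b.take (n - 1).toNat) (by norm_num)]
    rfl
  -- the triples scan equals the negated interior validity
  have hT : (b.take (n - 1).toNat).zip
        (((b.take (n - 1).toNat).drop 1).zip ((b.take (n - 1).toNat).drop 2))
      = (List.range ((n - 1).toNat - 2)).map
          (fun j => (b.getD j 0, b.getD (j + 1) 0, b.getD (j + 2) 0)) := by
    rw [pvZip3_eq, hheadlen]
    apply List.map_congr_left
    intro j hj
    rw [List.mem_range] at hj
    rw [hhg j (by omega), hhg (j + 1) (by omega), hhg (j + 2) (by omega)]
  have hRangeAll : (PySem.List.pyRange 1 (n - 2) 1).all (pvPb b)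
      = (List.range ((n - 1).toNat - 2)).all (fun j => pvPb b ((j : Int) + 1)) := by
    by_cases h3 : 3 ≤ n
    · have e : n - 2 = 1 + (((n - 1).toNat - 2 : Nat) : Int) := by omega
      rw [e, pvAllRange]
    · have hn2 : n = 2 := by omega
      have e1 : PySem.List.pyRange 1 (n - 2) 1 = [] :=
        PySem.List.pyRange_one_eq_nil (by omega)
      have e2 : (n - 1).toNat - 2 = 0 := by omega
      rw [e1, e2]
      rfl
  have hBool : pvAnyBad ((b.take (n - 1).toNat).zip
        (((b.take (n - 1).toNat).drop 1).zip ((b.take (n - 1).toNat).drop 2)))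
      = !((PySem.List.pyRange 1 (n - 2) 1).all (pvPb b)) := by
    rw [hT, pvAnyBad_eq_any, List.any_map, hRangeAll, List.any_eq_not_all_not]
    congr 1
    refine List.all_congr rfl ?_
    intro j
    simp only [Function.comp]
    exact pvPointwise b j
  -- head[0] and head[-1]
  have hh0 : PySem.List.pyGet? (b.take (n - 1).toNat) 0 = some (b.getD 0 0) := by
    rw [pvGetD_eq (b.take (n - 1).toNat) 0 (by omega) (by rw [hheadlen]; omega)]
    rw [show ((0 : Int).toNat) = 0 from rfl, hhg 0 (by omega)]
  have hhl : PySem.List.pyGet? (b.take (n - 1).toNat) (-1)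
      = some (b.getD ((n - 1).toNat - 1) 0) := by
    rw [PySem.List.pyGet?_neg_one, List.getLast?_eq_getElem?, hheadlen,
      List.getElem?_eq_getElem (by rw [hheadlen]; omega)]
    rw [← List.getD_eq_getElem _ 0 (by rw [hheadlen]; omega),
      hhg ((n - 1).toNat - 1) (by omega)]
  -- the pairwise ORs
  have hPairs : pvOrPairs ((b.take (n - 1).toNat).zip ((b.take (n - 1).toNat).drop 1))
      = (List.range ((n - 1).toNat - 1)).map
          (fun j => PySem.Int.bor (b.getD j 0) (b.getD (j + 1) 0)) := by
    rw [pvZip2_eq, hheadlen, pvOrPairs_eq_map, List.map_map]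
    apply List.map_congr_left
    intro j hj
    rw [List.mem_range] at hj
    simp only [Function.comp]
    rw [hhg j (by omega), hhg (j + 1) (by omega)]
  -- B's assembled list is pvG mapped over range(n)
  have hBarr : (b.getD 0 0) ::
      ((List.range ((n - 1).toNat - 1)).map
          (fun j => PySem.Int.bor (b.getD j 0) (b.getD (j + 1) 0))
        ++ [b.getD ((n - 1).toNat - 1) 0])
      = (PySem.List.pyRange 0 n 1).map (pvG n b) := by
    apply pvListEq
    · simp only [List.length_cons, List.length_append, List.length_map, List.length_range,
        List.length_nil, PySem.List.length_pyRange_one]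
      omega
    · intro k hk
      simp only [List.length_cons, List.length_append, List.length_map, List.length_nil,
        List.length_range] at hk
      have hRHS : ((PySem.List.pyRange 0 n 1).map (pvG n b)).getD k 0 = pvG n b (k : Int) := by
        rw [List.getD_eq_getElem _ _
            (by rw [List.length_map, PySem.List.length_pyRange_one]; omega),
          List.getElem_map, PySem.List.getElem_pyRange_one]
        norm_num
      rw [hRHS]
      cases k with
      | zero =>
        rw [List.getD_cons_zero]
        unfold pvG
        rw [if_neg (by norm_num; omega), if_pos (by norm_num)]
      | succ k' =>
        rw [List.getD_cons_succ]
        by_cases hk' : k' < (n - 1).toNat - 1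
        · rw [List.getD_append _ _ _ k' (by simp only [List.length_map, List.length_range]; omega),
            List.getD_eq_getElem _ _ (by simp only [List.length_map, List.length_range]; omega),
            List.getElem_map, List.getElem_range]
          unfold pvG
          rw [if_neg (by omega), if_neg (by omega)]
          have e1 : (((k' + 1 : Nat) : Int) - 1).toNat = k' := by omega
          have e2 : (((k' + 1 : Nat) : Int)).toNat = k' + 1 := by omega
          rw [e1, e2]
        · have hk0 : k' = (n - 1).toNat - 1 := by omega
          subst hk0
          have hlast : ((List.range ((n - 1).toNat - 1)).map
              (fun j => PySem.Int.bor (b.getD j 0) (b.getD (j + 1) 0))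
              ++ [b.getD ((n - 1).toNat - 1) 0]).getD ((n - 1).toNat - 1) 0
              = b.getD ((n - 1).toNat - 1) 0 := by
            have e : (n - 1).toNat - 1
                = ((List.range ((n - 1).toNat - 1)).map
                    (fun j => PySem.Int.bor (b.getD j 0) (b.getD (j + 1) 0))).length := by
              simp
            rw [e]
            simp
          rw [hlast]
          unfold pvG
          rw [if_pos (by omega)]
          have e1 : (n - 2).toNat = (n - 1).toNat - 1 := by omega
          rw [e1]
  -- assemble B
  have hBeq : pvCaseB n b
      = if (PySem.List.pyRange 1 (n - 2) 1).all (pvPb b)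
          then some ((PySem.List.pyRange 0 n 1).map (pvG n b)) else some [-1] := by
    simp only [pvCaseB]
    rw [hhead, hsl1, hsl2, hBool]
    by_cases hok : (PySem.List.pyRange 1 (n - 2) 1).all (pvPb b)
    · rw [hok]
      simp only [Bool.not_true, Bool.false_eq_true, if_false, if_true, eq_self_iff_true,
        hh0, hhl]
      rw [hPairs, hBarr]
    · simp only [Bool.not_eq_true] at hok
      rw [hok]
      simp
  -- conclude
  rw [hAeq, hBeq]
  by_cases hok : (PySem.List.pyRange 1 (n - 2) 1).all (pvPb b)
  · rw [if_pos hok, if_pos hok, harr]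
  · rw [if_neg hok, if_neg hok]

-- ---- folding over the test cases
lemma pvFold_eq (tcs : List (Int × List Int))
    (h : ∀ c ∈ tcs, 2 ≤ c.1 ∧ c.1 - 1 ≤ (c.2.length : Int)) :
    ∀ acc : List (List Int),
      tcs.foldl (fun results tc => results ++ [(pvCaseA tc.1 tc.2).getD []]) acc
        = tcs.foldl (fun results tc => results ++ [(pvCaseB tc.1 tc.2).getD []]) acc := by
  induction tcs with
  | nil => intro acc; rfl
  | cons c rest IH =>
    intro acc
    obtain ⟨g1, g2⟩ := h c List.mem_cons_self
    simp only [List.foldl_cons, pvCase_eq c.1 c.2 g1 g2]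
    exact IH (fun d hd => h d (List.mem_cons_of_mem _ hd)) _

-- ===== VERDICT (by name: the statement is the Claim_ definition above) =====
theorem reconstruct_and_spec : Claim_equal_reconstruct_and := by
  intro t tcs _ hpre
  unfold Spec_reconstruct_and reconstruct_and reconstruct_and_alt
  exact pvFold_eq tcs hpre []
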